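-- pv_equiv track=rewrite | github.com/OpenRLHF/OpenRLHF | scripts/prepare_lean_data.py | process_lean_proof
-- ===== SOURCE A (Python) =====
-- def process_lean_proof(proof_text):
--     """处理Lean证明文本,提取到:= by前的部分作为prompt"""
--     lines = proof_text.split("\n")
--     prompt_lines = []
--
--     for line in lines:
--         if ":= by" in line:
--             prompt_lines.append(line.split(":= by")[0])
--             break
--         else:
--             prompt_lines.append(line)
--
--     return "\n".join(prompt_lines)
-- ===== SOURCE B (Python) =====
-- def process_lean_proof(proof_text):
--     """Prefix of proof_text before the first ':= by' (whole text if absent)."""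
--     i = proof_text.find(":= by")
--     return proof_text if i == -1 else proof_text[:i]
-- ===== Notes on version B (the rewrite author's own statement) =====
-- stated objective: simpler
-- what changed: Replaces the split-into-lines accumulation loop (with break and per-line substring split) by a single str.find for the first ':= by' and one slice; correct because the marker contains no newline, so the first per-line hit is the first global occurrence.
import Mathlib
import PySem

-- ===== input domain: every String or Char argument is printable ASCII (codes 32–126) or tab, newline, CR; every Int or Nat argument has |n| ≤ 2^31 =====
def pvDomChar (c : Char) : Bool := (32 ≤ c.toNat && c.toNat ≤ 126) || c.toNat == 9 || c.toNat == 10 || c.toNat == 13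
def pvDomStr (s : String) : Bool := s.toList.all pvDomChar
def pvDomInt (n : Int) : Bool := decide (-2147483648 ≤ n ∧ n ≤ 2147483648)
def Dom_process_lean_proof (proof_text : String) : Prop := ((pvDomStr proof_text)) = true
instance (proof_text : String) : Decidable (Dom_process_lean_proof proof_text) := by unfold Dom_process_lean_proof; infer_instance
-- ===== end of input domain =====

-- B replaces A's line-splitting accumulation loop by one find of ":= by" and a slice (simpler; same return value).


-- ===== PORT A =====
-- A's for-loop with break over the lines (structural recursion over the same list, branches in order)
def pvLoopA (lines : List String) : List String :=
  match lines with
  | [] => []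
  | line :: rest =>
    if PySem.Str.isIn ":= by" line then
      -- prompt_lines.append(line.split(":= by")[0]); break
      -- split never raises (the separator literal is nonempty), and its result is nonempty, so [0] is in range
      [PySem.List.pyGetD ((PySem.Str.split? line ":= by").getD []) 0 ""]
    else
      line :: pvLoopA rest

def process_lean_proof (proof_text : String) : String :=
  -- lines = proof_text.split("\n")  (separator nonempty, so split? = some)
  let lines := (PySem.Str.split? proof_text "\n").getD []
  PySem.Str.join "\n" (pvLoopA lines)

-- ===== PORT B =====
def process_lean_proof_alt (proof_text : String) : String :=
  let i := PySem.Str.find proof_text ":= by"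
  if i = -1 then proof_text else PySem.Str.slice proof_text none (some i)

-- ===== PRECONDITION & SPEC =====
def Spec_process_lean_proof (proof_text : String) (out : String) : Prop := out = process_lean_proof_alt proof_text
instance (proof_text : String) (out : String) : Decidable (Spec_process_lean_proof proof_text out) := by unfold Spec_process_lean_proof; infer_instance

-- ===== CLAIM (what is proved, stated in full; the proofs are below) =====
def Claim_equal_process_lean_proof : Prop := ∀ (proof_text : String), Dom_process_lean_proof proof_text → Spec_process_lean_proof proof_text (process_lean_proof proof_text)

-- ===== LEMMAS AND PROOFS =====

-- take-until-marker: chars of s before the first occurrence of sub (all of s if none)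
def pvTU (sub : List Char) : List Char → List Char
  | [] => []
  | c :: r => if sub.isPrefixOf (c :: r) then [] else c :: pvTU sub r

-- splitOn with the one-char separator '\n', structurally
def pvSplitNl : List Char → List (List Char)
  | [] => [[]]
  | c :: r => if c = '\n' then [] :: pvSplitNl r else (pvSplitNl r).modifyHead (c :: ·)

-- the loop of A, on char lists
def pvLoopC (sub : List Char) : List (List Char) → List (List Char)
  | [] => []
  | l :: ls => if PySem.Chars.isIn sub l then [pvTU sub l] else l :: pvLoopC sub ls

lemma pvSplitNl_ne_nil (s : List Char) : pvSplitNl s ≠ [] := by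
  cases s with
  | nil => simp [pvSplitNl]
  | cons c r =>
    simp only [pvSplitNl]
    split_ifs
    · simp
    · intro h
      have := congrArg List.length h
      simp at this
      exact pvSplitNl_ne_nil r this

lemma pvLoopC_ne_nil (sub : List Char) {ls : List (List Char)} (h : ls ≠ []) :
    pvLoopC sub ls ≠ [] := by
  cases ls with
  | nil => exact absurd rfl h
  | cons l t =>
    simp only [pvLoopC]
    split_ifs <;> simp

lemma pvGo_splitNl (fuel : Nat) : ∀ (l cur : List Char) (acc : List (List Char)),
    l.length ≤ fuel →
    PySem.Chars.splitOn.go ['\n'] fuel l cur acc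
      = acc.reverse ++ (pvSplitNl l).modifyHead (cur.reverse ++ ·) := by
  induction fuel with
  | zero =>
    intro l cur acc hf
    have hl : l = [] := List.eq_nil_of_length_eq_zero (Nat.le_zero.mp hf)
    subst hl
    show ((cur.reverse ++ []) :: acc).reverse = _
    simp [pvSplitNl]
  | succ n ih =>
    intro l cur acc hf
    cases l with
    | nil =>
      show (cur.reverse :: acc).reverse = _
      simp [pvSplitNl]
    | cons c rest =>
      obtain ⟨b, t, hbt⟩ : ∃ b t, pvSplitNl rest = b :: t := by
        cases hx : pvSplitNl rest with
        | nil => exact absurd hx (pvSplitNl_ne_nil rest)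
        | cons a b => exact ⟨a, b, rfl⟩
      have hrest : rest.length ≤ n := by simpa using Nat.le_of_succ_le_succ hf
      show (if ['\n'].isPrefixOf (c :: rest)
              then PySem.Chars.splitOn.go ['\n'] n (List.drop 1 (c :: rest)) [] (cur.reverse :: acc)
              else PySem.Chars.splitOn.go ['\n'] n rest (c :: cur) acc) = _
      by_cases hc : c = '\n'
      · subst hc
        rw [if_pos (by simp [List.isPrefixOf])]
        rw [List.drop_one, List.tail_cons, ih rest [] (cur.reverse :: acc) hrest]
        simp [pvSplitNl, hbt]
      · rw [if_neg (by simp [List.isPrefixOf]; exact fun h => hc h.symm)]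
        rw [ih rest (c :: cur) acc hrest]
        simp [pvSplitNl, hc, hbt, List.append_assoc]

lemma splitOn_eq_pvSplitNl (s : List Char) :
    PySem.Chars.splitOn s ['\n'] = pvSplitNl s := by
  show PySem.Chars.splitOn.go ['\n'] (s.length + 1) s [] [] = _
  rw [pvGo_splitNl (s.length + 1) s [] [] (by omega)]
  simp only [List.reverse_nil, List.nil_append]
  cases h : pvSplitNl s with
  | nil => rfl
  | cons a t => simp [List.modifyHead]

-- the first piece of splitOn is the prefix before the first occurrence of sub
lemma pvGo_first (sub : List Char) (hsub : sub ≠ []) (fuel : Nat) :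
    ∀ (l cur : List Char) (acc : List (List Char)), l.length ≤ fuel →
    ∃ tail, PySem.Chars.splitOn.go sub fuel l cur acc
      = acc.reverse ++ (cur.reverse ++ pvTU sub l) :: tail := by
  induction fuel with
  | zero =>
    intro l cur acc hf
    have hl : l = [] := List.eq_nil_of_length_eq_zero (Nat.le_zero.mp hf)
    subst hl
    exact ⟨[], by show ((cur.reverse ++ []) :: acc).reverse = _; simp [pvTU]⟩
  | succ n ih =>
    intro l cur acc hf
    cases l with
    | nil =>
      exact ⟨[], by show (cur.reverse :: acc).reverse = _; simp [pvTU]⟩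
    | cons c rest =>
      show ∃ tail, (if sub.isPrefixOf (c :: rest)
              then PySem.Chars.splitOn.go sub n (List.drop sub.length (c :: rest)) [] (cur.reverse :: acc)
              else PySem.Chars.splitOn.go sub n rest (c :: cur) acc) = _
      by_cases hp : sub.isPrefixOf (c :: rest)
      · rw [if_pos hp]
        have hslen : 1 ≤ sub.length := List.length_pos_iff.mpr hsub
        obtain ⟨tail, htail⟩ := ih (List.drop sub.length (c :: rest)) [] (cur.reverse :: acc)
          (by rw [List.length_drop]; simp only [List.length_cons] at hf ⊢; omega)
        refine ⟨pvTU sub (List.drop sub.length (c :: rest)) :: tail, ?_⟩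
        rw [htail]
        simp [pvTU, hp]
      · rw [if_neg hp]
        obtain ⟨tail, htail⟩ := ih rest (c :: cur) acc (by simpa using Nat.le_of_succ_le_succ hf)
        refine ⟨tail, ?_⟩
        rw [htail]
        simp [pvTU, hp, List.append_assoc]

lemma pvSplitOn_first (sub : List Char) (hsub : sub ≠ []) (l : List Char) :
    ∃ tail, PySem.Chars.splitOn l sub = pvTU sub l :: tail := by
  obtain ⟨tail, htail⟩ := pvGo_first sub hsub (l.length + 1) l [] [] (by omega)
  exact ⟨tail, by simpa using htail⟩

-- a marker containing no '\n' is a prefix of l ++ '\n' :: rest iff it is a prefix of l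
lemma pvStraddle {sub l rest : List Char} (hn : '\n' ∉ sub) :
    sub <+: l ++ '\n' :: rest ↔ sub <+: l := by
  constructor
  · intro h
    by_cases hle : sub.length ≤ l.length
    · have heq := List.prefix_iff_eq_take.mp h
      rw [List.take_append_of_le_length hle] at heq
      rw [heq]
      exact List.take_prefix _ _
    · exfalso
      have hi : l.length < sub.length := Nat.lt_of_not_le hle
      have hget := (List.IsPrefix.getElem h hi).symm
      rw [List.getElem_append_right (le_refl l.length)] at hget
      simp at hget
      exact hn (hget ▸ List.getElem_mem hi)
  · intro h
    exact h.trans (List.prefix_append l ('\n' :: rest))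

lemma pvTU_append_not_in {sub : List Char} (hsub : sub ≠ []) (hn : '\n' ∉ sub) :
    ∀ {l : List Char} (rest : List Char), ¬ sub <:+: l →
    pvTU sub (l ++ '\n' :: rest) = l ++ '\n' :: pvTU sub rest := by
  intro l
  induction l with
  | nil =>
    intro rest _
    show (if sub.isPrefixOf ('\n' :: rest) then [] else '\n' :: pvTU sub rest) = _
    rw [if_neg]
    · simp
    · intro hp
      cases sub with
      | nil => exact hsub rfl
      | cons a s' =>
        have := (List.cons_prefix_cons.mp (List.isPrefixOf_iff_prefix.mp hp)).1
        exact hn (by simp [this])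
  | cons x l' ih =>
    intro rest h
    show (if sub.isPrefixOf (x :: (l' ++ '\n' :: rest)) then []
          else x :: pvTU sub (l' ++ '\n' :: rest)) = _
    rw [if_neg, ih rest (fun hinf => h (List.infix_cons hinf))]
    · simp
    · intro hp
      have : sub <+: (x :: l') ++ '\n' :: rest := by
        simpa using List.isPrefixOf_iff_prefix.mp hp
      exact h ((pvStraddle hn).mp this).isInfix

lemma pvTU_append_in {sub : List Char} (hn : '\n' ∉ sub) :
    ∀ {l : List Char} (rest : List Char), sub <:+: l →
    pvTU sub (l ++ '\n' :: rest) = pvTU sub l := by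
  intro l
  induction l with
  | nil =>
    intro rest h
    have : sub = [] := List.eq_nil_of_infix_nil h
    subst this
    show (if List.isPrefixOf [] ('\n' :: rest) then ([] : List Char) else _) = _
    simp [pvTU]
  | cons x l' ih =>
    intro rest h
    by_cases hp : sub.isPrefixOf (x :: l')
    · show (if sub.isPrefixOf (x :: (l' ++ '\n' :: rest)) then [] else _) = _
      rw [if_pos]
      · show _ = (if sub.isPrefixOf (x :: l') then [] else _)
        rw [if_pos hp]
      · apply List.isPrefixOf_iff_prefix.mpr
        have : sub <+: (x :: l') ++ '\n' :: rest :=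
          (List.isPrefixOf_iff_prefix.mp hp).trans (List.prefix_append _ _)
        simpa using this
    · have hpfx : ¬ sub <+: x :: (l' ++ '\n' :: rest) := by
        intro hc
        have : sub <+: (x :: l') ++ '\n' :: rest := by simpa using hc
        exact hp (List.isPrefixOf_iff_prefix.mpr ((pvStraddle hn).mp this))
      have hinf' : sub <:+: l' := by
        rcases List.infix_cons_iff.mp h with h1 | h1
        · exact absurd (List.isPrefixOf_iff_prefix.mpr h1) hp
        · exact h1
      show (if sub.isPrefixOf (x :: (l' ++ '\n' :: rest)) then [] else _) = _
      rw [if_neg (fun hc => hpfx (List.isPrefixOf_iff_prefix.mp hc))]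
      show x :: pvTU sub (l' ++ '\n' :: rest) = _
      rw [ih rest hinf']
      show _ = (if sub.isPrefixOf (x :: l') then [] else x :: pvTU sub l')
      rw [if_neg hp]

lemma pvSplitNl_no_nl : ∀ {s : List Char}, '\n' ∉ s → pvSplitNl s = [s] := by
  intro s
  induction s with
  | nil => intro _; rfl
  | cons c r ih =>
    intro h
    have hc : c ≠ '\n' := fun hc => h (by simp [hc])
    have hr : '\n' ∉ r := fun hr => h (by simp [hr])
    simp [pvSplitNl, hc, ih hr]

lemma pvSplitNl_append : ∀ {l : List Char} (rest : List Char), '\n' ∉ l →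
    pvSplitNl (l ++ '\n' :: rest) = l :: pvSplitNl rest := by
  intro l
  induction l with
  | nil => intro rest _; simp [pvSplitNl]
  | cons x l' ih =>
    intro rest h
    have hx : x ≠ '\n' := fun hc => h (by simp [hc])
    have hl : '\n' ∉ l' := fun hr => h (by simp [hr])
    simp [pvSplitNl, hx, ih rest hl]

lemma pvFind_go_shift (sub : List Char) (hsub : sub ≠ []) :
    ∀ (s : List Char) (k : Nat),
    PySem.Chars.find.go sub s k
      = if PySem.Chars.find.go sub s 0 = -1 then -1 else PySem.Chars.find.go sub s 0 + k := by
  intro s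
  induction s with
  | nil =>
    intro k
    have h0 : PySem.Chars.find.go sub [] 0 = -1 := by
      show (if sub.isEmpty then (0 : Int) else -1) = -1
      simp [List.isEmpty_iff, hsub]
    show (if sub.isEmpty then (k : Int) else -1) = _
    rw [h0]
    simp [List.isEmpty_iff, hsub]
  | cons c r ih =>
    intro k
    show (if sub.isPrefixOf (c :: r) then (k : Int) else PySem.Chars.find.go sub r (k+1)) = _
    by_cases hp : sub.isPrefixOf (c :: r)
    · have h0 : PySem.Chars.find.go sub (c :: r) 0 = 0 := by
        show (if sub.isPrefixOf (c :: r) then (0 : Int) else PySem.Chars.find.go sub r 1) = 0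
        rw [if_pos hp]
      rw [if_pos hp, h0]
      simp
    · rw [if_neg hp]
      have h0 : PySem.Chars.find.go sub (c :: r) 0
          = if sub.isPrefixOf (c :: r) then (0 : Int) else PySem.Chars.find.go sub r 1 := rfl
      rw [h0, if_neg hp, ih (k+1), ih 1]
      have hge : -1 ≤ PySem.Chars.find.go sub r 0 := PySem.Chars.neg_one_le_find r sub
      by_cases hr : PySem.Chars.find.go sub r 0 = -1
      · simp [hr]
      · rw [if_neg hr, if_neg (by omega), if_neg hr]
        push_cast
        omega

lemma pvTU_eq_find (sub : List Char) (hsub : sub ≠ []) :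
    ∀ (s : List Char), pvTU sub s
      = if PySem.Chars.find s sub = -1 then s else s.take (PySem.Chars.find s sub).toNat := by
  intro s
  induction s with
  | nil =>
    show ([] : List Char) = _
    have : PySem.Chars.find [] sub = -1 := by
      show (if sub.isEmpty then (0 : Int) else -1) = -1
      simp [List.isEmpty_iff, hsub]
    simp [this]
  | cons c r ih =>
    have hstep : PySem.Chars.find (c :: r) sub
        = if sub.isPrefixOf (c :: r) then (0 : Int) else PySem.Chars.find.go sub r 1 := rfl
    by_cases hp : sub.isPrefixOf (c :: r)
    · show (if sub.isPrefixOf (c :: r) then [] else _) = _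
      rw [if_pos hp, hstep, if_pos hp]
      simp
    · show (if sub.isPrefixOf (c :: r) then [] else c :: pvTU sub r) = _
      rw [if_neg hp, hstep, if_neg hp, pvFind_go_shift sub hsub r 1]
      have hge : -1 ≤ PySem.Chars.find r sub := PySem.Chars.neg_one_le_find r sub
      have hfr : PySem.Chars.find.go sub r 0 = PySem.Chars.find r sub := rfl
      rw [hfr]
      by_cases hr : PySem.Chars.find r sub = -1
      · rw [if_pos hr, if_pos rfl, ih, if_pos hr]
      · rw [if_neg hr, if_neg (by omega), ih, if_neg hr]
        simp only [Nat.cast_one]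
        have htn : (PySem.Chars.find r sub + 1).toNat = (PySem.Chars.find r sub).toNat + 1 := by
          omega
        rw [htn, List.take_succ_cons]

lemma pvTU_of_not_infix {sub : List Char} :
    ∀ {s : List Char}, ¬ sub <:+: s → pvTU sub s = s := by
  intro s
  induction s with
  | nil => intro _; rfl
  | cons c r ih =>
    intro h
    show (if sub.isPrefixOf (c :: r) then [] else c :: pvTU sub r) = _
    rw [if_neg (fun hp => h (List.isPrefixOf_iff_prefix.mp hp).isInfix)]
    rw [ih (fun hinf => h (List.infix_cons hinf))]

lemma pvMain_nonl (sub : List Char) {s : List Char} (h : '\n' ∉ s) :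
    PySem.Chars.join ['\n'] (pvLoopC sub (pvSplitNl s)) = pvTU sub s := by
  rw [pvSplitNl_no_nl h]
  by_cases hin : PySem.Chars.isIn sub s = true
  · show PySem.Chars.join ['\n'] (if PySem.Chars.isIn sub s then [pvTU sub s] else _) = _
    rw [if_pos hin, PySem.Chars.join_singleton]
  · have hninf : ¬ sub <:+: s :=
      (PySem.Chars.isIn_eq_false_iff sub s).mp (Bool.eq_false_iff.mpr (fun hc => hin hc))
    show PySem.Chars.join ['\n'] (if PySem.Chars.isIn sub s then _ else [s] ) = _
    rw [if_neg (fun hc => hin hc), PySem.Chars.join_singleton, pvTU_of_not_infix hninf]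

lemma pvMain (sub : List Char) (hsub : sub ≠ []) (hn : '\n' ∉ sub) (s : List Char) :
    PySem.Chars.join ['\n'] (pvLoopC sub (pvSplitNl s)) = pvTU sub s := by
  have key : ∀ (n : Nat) (s : List Char), s.length ≤ n →
      PySem.Chars.join ['\n'] (pvLoopC sub (pvSplitNl s)) = pvTU sub s := by
    intro n
    induction n with
    | zero =>
      intro s hs
      have hnil : s = [] := List.eq_nil_of_length_eq_zero (Nat.le_zero.mp hs)
      subst hnil
      exact pvMain_nonl sub (by simp)
    | succ n ih =>
      intro s hs
      by_cases hmem : '\n' ∈ s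
      · -- split at the first newline
        have hsplit : s.takeWhile (fun c => c ≠ '\n') ++ s.dropWhile (fun c => c ≠ '\n') = s :=
          List.takeWhile_append_dropWhile
        set l := s.takeWhile (fun c => c ≠ '\n') with hl
        set dw := s.dropWhile (fun c => c ≠ '\n') with hdw
        have hdwne : dw ≠ [] := by
          intro h0
          have hsl : s = l := by rw [← hsplit, h0, List.append_nil]
          have := List.mem_takeWhile_imp (hsl ▸ hmem)
          simp at this
        obtain ⟨d, rest, hdr⟩ : ∃ d rest, dw = d :: rest := by
          cases hx : dw with
          | nil => exact absurd hx hdwne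
          | cons a b => exact ⟨a, b, rfl⟩
        have hd : d = '\n' := by
          have hne : s.dropWhile (fun c => decide (c ≠ '\n')) ≠ [] := hdw ▸ hdwne
          have hh := List.head_dropWhile_not (fun c => decide (c ≠ '\n')) (l := s) hne
          have hhead : (s.dropWhile (fun c => decide (c ≠ '\n'))).head hne = d := by
            have hcons : s.dropWhile (fun c => decide (c ≠ '\n')) = d :: rest := by
              rw [← hdw]; exact hdr
            simp only [hcons, List.head_cons]
          rw [hhead] at hh
          simpa using hh
        have hnl : '\n' ∉ l := fun hm => by simpa using List.mem_takeWhile_imp hm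
        have hs' : s = l ++ '\n' :: rest := by rw [← hsplit, hdr, hd]
        have hlen : rest.length ≤ n := by
          have := congrArg List.length hs'
          simp at this
          omega
        rw [hs', pvSplitNl_append rest hnl]
        by_cases hin : PySem.Chars.isIn sub l = true
        · have hinf : sub <:+: l := (PySem.Chars.isIn_iff_infix sub l).mp hin
          show PySem.Chars.join ['\n'] (if PySem.Chars.isIn sub l then [pvTU sub l] else _) = _
          rw [if_pos hin, PySem.Chars.join_singleton, pvTU_append_in hn rest hinf]
        · have hninf : ¬ sub <:+: l :=
            (PySem.Chars.isIn_eq_false_iff sub l).mp (Bool.eq_false_iff.mpr (fun hc => hin hc))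
          obtain ⟨b, t, hbt⟩ : ∃ b t, pvLoopC sub (pvSplitNl rest) = b :: t := by
            cases hx : pvLoopC sub (pvSplitNl rest) with
            | nil => exact absurd hx (pvLoopC_ne_nil sub (pvSplitNl_ne_nil rest))
            | cons a b => exact ⟨a, b, rfl⟩
          show PySem.Chars.join ['\n'] (if PySem.Chars.isIn sub l then _ else l :: pvLoopC sub (pvSplitNl rest)) = _
          rw [if_neg (fun hc => hin hc), hbt, PySem.Chars.join_cons_cons, ← hbt, ih rest hlen,
            pvTU_append_not_in hsub hn rest hninf]
          simp
      · exact pvMain_nonl sub hmem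
  exact key s.length s (le_refl _)

lemma pvLoopA_map (lls : List (List Char)) :
    pvLoopA (lls.map String.ofList) = (pvLoopC (":= by".toList) lls).map String.ofList := by
  induction lls with
  | nil => rfl
  | cons l t ih =>
    have hisin : PySem.Str.isIn ":= by" (String.ofList l) = PySem.Chars.isIn (":= by".toList) l := by
      simp [PySem.Str.isIn, String.toList_ofList]
    show (if PySem.Str.isIn ":= by" (String.ofList l) then _ else _) = _
    rw [hisin]
    by_cases hin : PySem.Chars.isIn (":= by".toList) l = true
    · rw [if_pos hin]
      have hsplit : PySem.Str.split? (String.ofList l) ":= by"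
          = some ((PySem.Chars.splitOn l (":= by".toList)).map String.ofList) := by
        show Option.map _ (PySem.Chars.split? (String.ofList l).toList ":= by".toList) = _
        rw [String.toList_ofList]
        show Option.map _ (if (":= by".toList).isEmpty then none
              else some (PySem.Chars.splitOn l ":= by".toList)) = _
        simp
      obtain ⟨tail, htail⟩ := pvSplitOn_first (":= by".toList) (by decide) l
      rw [hsplit, htail]
      show [PySem.List.pyGetD (String.ofList (pvTU ":= by".toList l) :: tail.map String.ofList) 0 ""] = _
      rw [PySem.List.pyGetD_zero_cons]
      show _ = (if PySem.Chars.isIn ":= by".toList l then [pvTU ":= by".toList l] else _).map String.ofList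
      rw [if_pos hin]
      rfl
    · rw [if_neg (fun hc => hin hc)]
      show _ = (if PySem.Chars.isIn ":= by".toList l then _ else l :: pvLoopC ":= by".toList t).map String.ofList
      rw [if_neg (fun hc => hin hc)]
      simp only [List.map_cons]
      rw [ih]

-- ===== VERDICT (by name: the statement is the Claim_ definition above) =====
theorem process_lean_proof_spec : Claim_equal_process_lean_proof := by
  intro s _
  unfold Spec_process_lean_proof process_lean_proof process_lean_proof_alt
  have hlines : (PySem.Str.split? s "\n").getD [] = (pvSplitNl s.toList).map String.ofList := by
    show (Option.map _ (PySem.Chars.split? s.toList "\n".toList)).getD [] = _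
    show (Option.map _ (if ("\n".toList).isEmpty then none
          else some (PySem.Chars.splitOn s.toList "\n".toList))).getD [] = _
    rw [show "\n".toList = ['\n'] from rfl]
    simp [splitOn_eq_pvSplitNl]
  simp only [hlines]
  rw [pvLoopA_map]
  have hjoin : PySem.Str.join "\n" ((pvLoopC (":= by".toList) (pvSplitNl s.toList)).map String.ofList)
      = String.ofList (PySem.Chars.join ['\n'] (pvLoopC (":= by".toList) (pvSplitNl s.toList))) := by
    show String.ofList (PySem.Chars.join "\n".toList (((pvLoopC (":= by".toList) (pvSplitNl s.toList)).map String.ofList).map String.toList)) = _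
    rw [show "\n".toList = ['\n'] from rfl, List.map_map]
    have hmap : (pvLoopC (":= by".toList) (pvSplitNl s.toList)).map (String.toList ∘ String.ofList)
        = pvLoopC (":= by".toList) (pvSplitNl s.toList) := by
      simp [Function.comp_def, String.toList_ofList]
    rw [hmap]
  rw [hjoin, pvMain (":= by".toList) (by decide) (by decide) s.toList,
    pvTU_eq_find (":= by".toList) (by decide) s.toList]
  have hfind : PySem.Str.find s ":= by" = PySem.Chars.find s.toList ":= by".toList := rfl
  by_cases hf : PySem.Chars.find s.toList ":= by".toList = -1
  · rw [if_pos hf]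
    show String.ofList s.toList = (if PySem.Str.find s ":= by" = -1 then s else _)
    rw [if_pos (by rw [hfind]; exact hf), String.ofList_toList]
  · rw [if_neg hf]
    show _ = (if PySem.Str.find s ":= by" = -1 then s else PySem.Str.slice s none (some (PySem.Str.find s ":= by")))
    rw [if_neg (by rw [hfind]; exact hf)]
    show String.ofList _ = String.ofList (PySem.Chars.slice s.toList none (some (PySem.Str.find s ":= by")))
    congr 1
    rw [hfind]
    have hnn : 0 ≤ PySem.Chars.find s.toList ":= by".toList := by
      have := PySem.Chars.neg_one_le_find s.toList ":= by".toList
      omega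
    rw [show PySem.Chars.slice s.toList none (some (PySem.Chars.find s.toList ":= by".toList))
          = PySem.List.slice s.toList none (some (PySem.Chars.find s.toList ":= by".toList)) from rfl,
      PySem.List.slice_to _ hnn]
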